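-- pv_equiv track=rewrite | github.com/AutoBot80/MyAuto | backend/app/services/qr_decode_service.py | _extract_uidai_fields
-- ===== SOURCE A (Python) =====
-- from typing import Any
--
-- UIDAI_FIELD_MAP: dict[str, list[str]] = {
--     "aadhar_id": ["uid", "aadhaarno", "aadhar", "printletterbarcodedata.uid"],
--     "name": ["name", "poi.name", "printletterbarcodedata.name"],
--     # UIDAI XML often uses gnd (not gndr) on PrintLetterBarcodeData root
--     "gender": [
--         "gnd",
--         "gndr",
--         "gender",
--         "gen",
--         "sex",
--         "poi.gnd",
--         "poi.gndr",
--         "poi.gender",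
--         "poi.sex",
--         "printletterbarcodedata.gnd",
--         "printletterbarcodedata.gndr",
--         "printletterbarcodedata.gender",
--     ],
--     "year_of_birth": ["yob", "yearofbirth", "poi.yob", "printletterbarcodedata.yob"],
--     "date_of_birth": [
--         "dob",
--         "dateofbirth",
--         "date_of_birth",
--         "birthdate",
--         "birth_date",
--         "dobon",
--         "poi.dob",
--         "poi.dateofbirth",
--         "poi.date_of_birth",
--         "printletterbarcodedata.dob",
--         "printletterbarcodedata.dateofbirth",
--     ],
--     "care_of": ["careof", "co", "care_of", "poa.careof", "printletterbarcodedata.co"],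
--     "house": ["house", "poa.house", "printletterbarcodedata.house"],
--     "street": ["street", "poa.street", "printletterbarcodedata.street", "street2"],
--     "location": ["lmt", "loc", "locality", "poa.lmt", "location", "landmark", "printletterbarcodedata.loc"],
--     "city": ["vtc", "lgc", "city", "poa.vtc", "poa.lgc", "town", "village", "printletterbarcodedata.vtc", "printletterbarcodedata.lgc"],
--     "post_office": ["po", "postoffice", "poa.po", "post_office", "printletterbarcodedata.po"],
--     "district": ["dist", "district", "poa.dist", "lgc", "printletterbarcodedata.dist", "printletterbarcodedata.lgc"],
--     "sub_district": ["subdist", "subdistrict", "poa.subdist", "sub_district", "tehsil", "printletterbarcodedata.subdist"],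
--     "state": ["state", "st", "poa.state", "printletterbarcodedata.state"],
--     "pin_code": ["pc", "pincode", "pin", "poa.pc", "pin_code", "printletterbarcodedata.pc"],
--     "mobile": ["mobile", "mobileno", "phone", "tel", "ph", "mobile_number", "contact", "m"],
-- }
--
-- def _normalize_key(k: str) -> str:
--     """Lowercase and strip for matching."""
--     return k.lower().strip()
--
-- def _extract_uidai_fields(parsed: dict[str, Any]) -> dict[str, str]:
--     """Map raw parsed XML keys to the 15 display fields. Returns only non-empty values."""
--     out: dict[str, str] = {}
--     # Build normalized key -> original value
--     norm_to_val: dict[str, str] = {}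
--     for k, v in parsed.items():
--         if v is None or (isinstance(v, str) and not v.strip()):
--             continue
--         n = _normalize_key(k)
--         norm_to_val[n] = str(v).strip()
--         # If key is dotted (e.g. PrintLetterBarcodeData.Name), also register leaf name for matching
--         if "." in n:
--             leaf = n.split(".")[-1]
--             if leaf and leaf not in norm_to_val:
--                 norm_to_val[leaf] = str(v).strip()
--     for display_key, candidates in UIDAI_FIELD_MAP.items():
--         for cand in candidates:
--             n = _normalize_key(cand)
--             if n in norm_to_val:
--                 out[display_key] = norm_to_val[n]
--                 break
--     # Year of birth: if we have DOB but not YOB, try to take year from DOB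
--     if "year_of_birth" not in out and "date_of_birth" in out:
--         dob = out["date_of_birth"]
--         if len(dob) >= 4 and dob[:4].isdigit():
--             out["year_of_birth"] = dob[:4]
--         elif "-" in dob:
--             parts = dob.split("-")
--             for p in parts:
--                 if len(p) == 4 and p.isdigit():
--                     out["year_of_birth"] = p
--                     break
--         elif "/" in dob:
--             # DD/MM/YYYY or MM/DD/YYYY — take 4-digit year token
--             for p in dob.replace(".", "/").split("/"):
--                 p = p.strip()
--                 if len(p) == 4 and p.isdigit():
--                     out["year_of_birth"] = p
--                     break
--     # Many cards only encode YOB in QR; copy to date_of_birth so downstream (submit_info / DMS) gets a value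
--     if "date_of_birth" not in out and "year_of_birth" in out:
--         y = out["year_of_birth"].strip()
--         if y.isdigit() and len(y) == 4:
--             out["date_of_birth"] = y
--     return out
-- ===== SOURCE B (Python) =====
-- from typing import Any, Optional
--
-- _FIELDS: list[tuple[str, list[str]]] = [
--     ("aadhar_id", ["uid", "aadhaarno", "aadhar", "printletterbarcodedata.uid"]),
--     ("name", ["name", "poi.name", "printletterbarcodedata.name"]),
--     ("gender", [
--         "gnd", "gndr", "gender", "gen", "sex",
--         "poi.gnd", "poi.gndr", "poi.gender", "poi.sex",
--         "printletterbarcodedata.gnd", "printletterbarcodedata.gndr", "printletterbarcodedata.gender",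
--     ]),
--     ("year_of_birth", ["yob", "yearofbirth", "poi.yob", "printletterbarcodedata.yob"]),
--     ("date_of_birth", [
--         "dob", "dateofbirth", "date_of_birth", "birthdate", "birth_date", "dobon",
--         "poi.dob", "poi.dateofbirth", "poi.date_of_birth",
--         "printletterbarcodedata.dob", "printletterbarcodedata.dateofbirth",
--     ]),
--     ("care_of", ["careof", "co", "care_of", "poa.careof", "printletterbarcodedata.co"]),
--     ("house", ["house", "poa.house", "printletterbarcodedata.house"]),
--     ("street", ["street", "poa.street", "printletterbarcodedata.street", "street2"]),
--     ("location", ["lmt", "loc", "locality", "poa.lmt", "location", "landmark", "printletterbarcodedata.loc"]),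
--     ("city", ["vtc", "lgc", "city", "poa.vtc", "poa.lgc", "town", "village", "printletterbarcodedata.vtc", "printletterbarcodedata.lgc"]),
--     ("post_office", ["po", "postoffice", "poa.po", "post_office", "printletterbarcodedata.po"]),
--     ("district", ["dist", "district", "poa.dist", "lgc", "printletterbarcodedata.dist", "printletterbarcodedata.lgc"]),
--     ("sub_district", ["subdist", "subdistrict", "poa.subdist", "sub_district", "tehsil", "printletterbarcodedata.subdist"]),
--     ("state", ["state", "st", "poa.state", "printletterbarcodedata.state"]),
--     ("pin_code", ["pc", "pincode", "pin", "poa.pc", "pin_code", "printletterbarcodedata.pc"]),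
--     ("mobile", ["mobile", "mobileno", "phone", "tel", "ph", "mobile_number", "contact", "m"]),
-- ]
--
-- def _normalize_key(k: str) -> str:
--     """Lowercase and strip for matching."""
--     return k.lower().strip()
--
-- # Reverse index built ONCE at import time from the field table: normalized candidate -> [(display_key, rank)],
-- # where rank is the candidate's priority position inside that field's candidate list.
-- _REVERSE: dict[str, list[tuple[str, int]]] = {}
-- for _f, _cands in _FIELDS:
--     for _i, _c in enumerate(_cands):
--         _REVERSE.setdefault(_normalize_key(_c), []).append((_f, _i))
--
-- def _leaf_of(n: str) -> Optional[str]: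
--     """Leaf name of a dotted key, or None if n is not dotted or the leaf is empty."""
--     if "." in n:
--         leaf = n.split(".")[-1]
--         if leaf:
--             return leaf
--     return None
--
-- def _build_norm(parsed: dict[str, Any]) -> dict[str, str]:
--     """normalized key -> stripped value; dotted keys also register their leaf if free."""
--     norm: dict[str, str] = {}
--     for k, v in parsed.items():
--         if v is None or (isinstance(v, str) and not v.strip()):
--             continue
--         n = _normalize_key(k)
--         val = str(v).strip()
--         norm[n] = val
--         leaf = _leaf_of(n)
--         if leaf is not None and leaf not in norm:
--             norm[leaf] = val
--     return norm
--
-- def _first_year(parts: list[str]) -> Optional[str]: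
--     return next((p for p in parts if len(p) == 4 and p.isdigit()), None)
--
-- def _year_from_dob(dob: str) -> Optional[str]:
--     if len(dob) >= 4 and dob[:4].isdigit():
--         return dob[:4]
--     if "-" in dob:
--         return _first_year(dob.split("-"))
--     if "/" in dob:
--         return _first_year([p.strip() for p in dob.replace(".", "/").split("/")])
--     return None
--
-- def _extract_uidai_fields(parsed: dict[str, Any]) -> dict[str, str]:
--     """Map raw parsed XML keys to the 15 display fields. Returns only non-empty values."""
--     norm = _build_norm(parsed)
--     # Single pass over the present keys: per display field keep the value of lowest rank.
--     best: dict[str, tuple[int, str]] = {}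
--     for n, v in norm.items():
--         for f, r in _REVERSE.get(n, []):
--             cur = best.get(f)
--             if cur is None or r < cur[0]:
--                 best[f] = (r, v)
--     out: dict[str, str] = {}
--     for f, _ in _FIELDS:
--         if f in best:
--             out[f] = best[f][1]
--     # Year of birth: if we have DOB but not YOB, try to take year from DOB
--     if "year_of_birth" not in out and "date_of_birth" in out:
--         y = _year_from_dob(out["date_of_birth"])
--         if y is not None:
--             out["year_of_birth"] = y
--     # Many cards only encode YOB in QR; copy to date_of_birth so downstream gets a value
--     if "date_of_birth" not in out and "year_of_birth" in out:
--         y = out["year_of_birth"].strip()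
--         if len(y) == 4 and y.isdigit():
--             out["date_of_birth"] = y
--     return out
-- ===== Notes on version B (the rewrite author's own statement) =====
-- stated objective: alternative
-- what changed: Replaces A's per-field scan over each field's candidate list with a reverse index (normalized candidate -> (field, rank)) built once at import time; one pass over the present normalized keys keeps, per display field, the value of lowest rank (reproducing first-candidate-wins), and the key-normalization and DOB/YOB derivation are refactored into helper functions (_leaf_of, _first_year via next(), _year_from_dob).
import Mathlib
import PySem

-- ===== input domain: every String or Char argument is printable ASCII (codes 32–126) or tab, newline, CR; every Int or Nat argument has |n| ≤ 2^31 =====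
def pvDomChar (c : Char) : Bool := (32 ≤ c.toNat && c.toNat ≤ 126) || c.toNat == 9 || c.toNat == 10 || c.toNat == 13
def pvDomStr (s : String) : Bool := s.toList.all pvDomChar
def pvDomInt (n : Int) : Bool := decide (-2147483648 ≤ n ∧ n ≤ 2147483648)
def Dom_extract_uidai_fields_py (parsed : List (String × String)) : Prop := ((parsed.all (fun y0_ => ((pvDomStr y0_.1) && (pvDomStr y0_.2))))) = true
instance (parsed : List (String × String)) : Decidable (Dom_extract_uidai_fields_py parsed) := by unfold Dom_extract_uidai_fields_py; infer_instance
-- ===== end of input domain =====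

-- B replaces A's per-field candidate scans by a reverse index (candidate -> (field, rank)) built
-- once, plus a single lowest-rank-wins pass over the present keys, and refactors the key-building
-- and DOB/YOB derivation into helpers; same return value (alternative decomposition).

-- ===== PORT A =====
-- UIDAI_FIELD_MAP (shared constant of the module, used by both implementations)
def fieldMap : List (String × List String) :=
  [("aadhar_id", ["uid", "aadhaarno", "aadhar", "printletterbarcodedata.uid"]),
   ("name", ["name", "poi.name", "printletterbarcodedata.name"]),
   ("gender", ["gnd", "gndr", "gender", "gen", "sex", "poi.gnd", "poi.gndr", "poi.gender",
               "poi.sex", "printletterbarcodedata.gnd", "printletterbarcodedata.gndr",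
               "printletterbarcodedata.gender"]),
   ("year_of_birth", ["yob", "yearofbirth", "poi.yob", "printletterbarcodedata.yob"]),
   ("date_of_birth", ["dob", "dateofbirth", "date_of_birth", "birthdate", "birth_date", "dobon",
                      "poi.dob", "poi.dateofbirth", "poi.date_of_birth",
                      "printletterbarcodedata.dob", "printletterbarcodedata.dateofbirth"]),
   ("care_of", ["careof", "co", "care_of", "poa.careof", "printletterbarcodedata.co"]),
   ("house", ["house", "poa.house", "printletterbarcodedata.house"]),
   ("street", ["street", "poa.street", "printletterbarcodedata.street", "street2"]),
   ("location", ["lmt", "loc", "locality", "poa.lmt", "location", "landmark",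
                 "printletterbarcodedata.loc"]),
   ("city", ["vtc", "lgc", "city", "poa.vtc", "poa.lgc", "town", "village",
             "printletterbarcodedata.vtc", "printletterbarcodedata.lgc"]),
   ("post_office", ["po", "postoffice", "poa.po", "post_office", "printletterbarcodedata.po"]),
   ("district", ["dist", "district", "poa.dist", "lgc", "printletterbarcodedata.dist",
                 "printletterbarcodedata.lgc"]),
   ("sub_district", ["subdist", "subdistrict", "poa.subdist", "sub_district", "tehsil",
                     "printletterbarcodedata.subdist"]),
   ("state", ["state", "st", "poa.state", "printletterbarcodedata.state"]),
   ("pin_code", ["pc", "pincode", "pin", "poa.pc", "pin_code", "printletterbarcodedata.pc"]),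
   ("mobile", ["mobile", "mobileno", "phone", "tel", "ph", "mobile_number", "contact", "m"])]

-- _normalize_key (shared helper): k.lower().strip()
def normKey (k : String) : String := PySem.Str.strip (PySem.Str.lower k)

-- A's norm_to_val building loop, one body per (k, v) pair of parsed:
-- values are strings here, so `v is None` never fires and str(v) = v
def buildStep (d : PySem.Dict String String) (kv : String × String) : PySem.Dict String String :=
  (if PySem.Str.strip kv.2 = "" then d
    else
      let n := normKey kv.1
      let d1 := d.insert n (PySem.Str.strip kv.2)
      if PySem.Str.isIn "." n then
        match PySem.Str.split? n "." with
        | some parts =>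
          match PySem.List.pyGet? parts (-1) with      -- parts[-1]; split never returns [], so some
          | some leaf =>
            if leaf ≠ "" ∧ d1.contains leaf = false then d1.insert leaf (PySem.Str.strip kv.2)
            else d1
          | none => d1
        | none => d1                                    -- unreachable: separator "." is nonempty
      else d1)

def buildNorm (parsed : List (String × String)) : PySem.Dict String String :=
  parsed.foldl buildStep PySem.Dict.empty

-- A's inner loop over the 4-digit tokens of a split DOB
def yearFromParts : List String → Option String
  | [] => none
  | p :: t => if PySem.Str.len p = 4 ∧ PySem.Str.strIsdigit p then some p else yearFromParts t

-- A's trailing DOB/YOB derivation block, verbatim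
def derivePhase (out0 : PySem.Dict String String) : PySem.Dict String String :=
  let out1 :=
    if out0.contains "year_of_birth" = false ∧ out0.contains "date_of_birth" = true then
      let dob := out0.getD "date_of_birth" ""
      if 4 ≤ PySem.Str.len dob ∧ PySem.Str.strIsdigit (PySem.Str.slice dob none (some 4)) = true then
        out0.insert "year_of_birth" (PySem.Str.slice dob none (some 4))
      else if PySem.Str.isIn "-" dob then
        match PySem.Str.split? dob "-" with
        | some parts =>
          match yearFromParts parts with
          | some p => out0.insert "year_of_birth" p
          | none => out0
        | none => out0
      else if PySem.Str.isIn "/" dob then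
        match PySem.Str.split? (PySem.Str.replace dob "." "/") "/" with
        | some parts =>
          match yearFromParts (parts.map PySem.Str.strip) with   -- p = p.strip() before the test
          | some p => out0.insert "year_of_birth" p
          | none => out0
        | none => out0
      else out0
    else out0
  if out1.contains "date_of_birth" = false ∧ out1.contains "year_of_birth" = true then
    let y := PySem.Str.strip (out1.getD "year_of_birth" "")
    if PySem.Str.strIsdigit y = true ∧ PySem.Str.len y = 4 then out1.insert "date_of_birth" y
    else out1
  else out1

-- A's matching loop: for each display field scan its candidate list, first present candidate wins
def firstHit (d : PySem.Dict String String) : List String → Option String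
  | [] => none
  | c :: t =>
    let n := normKey c
    if d.contains n then d.get? n else firstHit d t

def matchFields (d : PySem.Dict String String) : PySem.Dict String String :=
  fieldMap.foldl (fun out fc =>
    match firstHit d fc.2 with
    | some v => out.insert fc.1 v
    | none => out) PySem.Dict.empty

def extract_uidai_fields_py (parsed : List (String × String)) : List (String × String) :=
  (derivePhase (matchFields (buildNorm parsed))).items

-- ===== PORT B =====
-- _REVERSE, built once from the field map: normalized candidate -> [(display field, rank)]
def withIdx (f : String) : Nat → List String → List (String × (String × Nat))
  | _, [] => []
  | i, c :: t => (normKey c, (f, i)) :: withIdx f (i+1) t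

def revPairs : List (String × (String × Nat)) :=
  fieldMap.flatMap (fun fc => withIdx fc.1 0 fc.2)

def revIndex : PySem.Dict String (List (String × Nat)) :=
  revPairs.foldl (fun d p => d.modify p.1 [] (fun l => l ++ [p.2])) PySem.Dict.empty

-- _leaf_of: leaf name of a dotted key, or none if not dotted / leaf empty
def leafOf (n : String) : Option String :=
  if PySem.Str.isIn "." n then
    match PySem.Str.split? n "." with
    | some parts =>
      match PySem.List.pyGet? parts (-1) with
      | some leaf => if leaf = "" then none else some leaf
      | none => none
    | none => none
  else none

-- _build_norm, written as structural recursion over the remaining pairs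
def normPass (d : PySem.Dict String String) : List (String × String) → PySem.Dict String String
  | [] => d
  | (k, v) :: rest =>
    if PySem.Str.strip v = "" then normPass d rest
    else
      let n := normKey k
      let val := PySem.Str.strip v
      let d1 := d.insert n val
      let d2 :=
        match leafOf n with
        | some leaf => if d1.contains leaf then d1 else d1.insert leaf val
        | none => d1
      normPass d2 rest

-- _first_year: first 4-digit-token of the list (next(...) over a generator)
def firstYear (ps : List String) : Option String :=
  ps.find? (fun p => PySem.Str.len p == 4 && PySem.Str.strIsdigit p)

-- _year_from_dob; s.split(sep) always succeeds in Python, so the getD default is dead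
def yearFromDob (dob : String) : Option String :=
  if 4 ≤ PySem.Str.len dob ∧ PySem.Str.strIsdigit (PySem.Str.slice dob none (some 4)) = true then
    some (PySem.Str.slice dob none (some 4))
  else if PySem.Str.isIn "-" dob then
    firstYear ((PySem.Str.split? dob "-").getD [])
  else if PySem.Str.isIn "/" dob then
    firstYear (((PySem.Str.split? (PySem.Str.replace dob "." "/") "/").getD []).map PySem.Str.strip)
  else none

-- one pass over the present keys: per display field keep the value of lowest rank
def bestOf (d : PySem.Dict String String) : PySem.Dict String (Nat × String) :=
  d.items.foldl (fun b nv =>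
    (revIndex.getD nv.1 []).foldl (fun b fr =>
      match b.get? fr.1 with
      | none => b.insert fr.1 (fr.2, nv.2)
      | some cur => if fr.2 < cur.1 then b.insert fr.1 (fr.2, nv.2) else b) b) PySem.Dict.empty

def extract_uidai_fields_py_alt (parsed : List (String × String)) : List (String × String) :=
  let norm := normPass PySem.Dict.empty parsed
  let best := bestOf norm
  let out := (fieldMap.map (·.1)).foldl (fun out f =>
    match best.get? f with
    | some rv => out.insert f rv.2
    | none => out) PySem.Dict.empty
  let out1 :=
    if out.contains "year_of_birth" = false ∧ out.contains "date_of_birth" = true then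
      match yearFromDob (out.getD "date_of_birth" "") with
      | some y => out.insert "year_of_birth" y
      | none => out
    else out
  let out2 :=
    if out1.contains "date_of_birth" = false ∧ out1.contains "year_of_birth" = true then
      let y := PySem.Str.strip (out1.getD "year_of_birth" "")
      if PySem.Str.len y = 4 ∧ PySem.Str.strIsdigit y = true then out1.insert "date_of_birth" y
      else out1
    else out1
  out2.items

-- ===== PRECONDITION & SPEC =====
def Spec_extract_uidai_fields_py (parsed : List (String × String)) (out : List (String × String)) : Prop := out = extract_uidai_fields_py_alt parsed
instance (parsed : List (String × String)) (out : List (String × String)) : Decidable (Spec_extract_uidai_fields_py parsed out) := by unfold Spec_extract_uidai_fields_py; infer_instance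

-- ===== CLAIM (what is proved, stated in full; the proofs are below) =====
def Claim_equal_extract_uidai_fields_py : Prop := ∀ (parsed : List (String × String)), Dom_extract_uidai_fields_py parsed → Spec_extract_uidai_fields_py parsed (extract_uidai_fields_py parsed)

-- ===== LEMMAS AND PROOFS =====

-- proof-only helpers: the common specification both matching phases are reduced to
def updMin (o : Option (Nat × String)) (r : Nat) (v : String) : Option (Nat × String) :=
  match o with
  | none => some (r, v)
  | some c => if r < c.1 then some (r, v) else o

def cmin (o b : Option (Nat × String)) : Option (Nat × String) :=
  match b with
  | none => o
  | some c => updMin o c.1 c.2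

def lookupL (items : List (String × String)) (c : String) : Option String :=
  (items.find? (fun p => p.1 == c)).map (·.2)

-- first candidate (from rank k on) present in items, with its rank and value
def bspecL (items : List (String × String)) : Nat → List String → Option (Nat × String)
  | _, [] => none
  | k, c :: t =>
    match lookupL items c with
    | some v => some (k, v)
    | none => bspecL items (k+1) t

-- A's matching phase phrased over B's `best` dictionary (the shape matchFields is rewritten into)
def matchFieldsB (d : PySem.Dict String String) : PySem.Dict String String :=
  let best := bestOf d
  fieldMap.foldl (fun out fc =>
    match best.get? fc.1 with
    | some rv => out.insert fc.1 rv.2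
    | none => out) PySem.Dict.empty

-- ---- B's norm pass = A's norm pass ----

theorem leafStep_eq (d1 : PySem.Dict String String) (n sv : String) :
    (match leafOf n with
     | some leaf => if d1.contains leaf then d1 else d1.insert leaf sv
     | none => d1)
    = (if PySem.Str.isIn "." n then
        match PySem.Str.split? n "." with
        | some parts =>
          match PySem.List.pyGet? parts (-1) with
          | some leaf => if leaf ≠ "" ∧ d1.contains leaf = false then d1.insert leaf sv else d1
          | none => d1
        | none => d1
      else d1) := by
  unfold leafOf
  by_cases hi : PySem.Str.isIn "." n = true
  · rw [if_pos hi, if_pos hi]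
    cases PySem.Str.split? n "." with
    | none => rfl
    | some parts =>
      show (match (match PySem.List.pyGet? parts (-1) with
                   | some leaf => if leaf = "" then none else some leaf
                   | none => none) with
            | some leaf => if d1.contains leaf then d1 else d1.insert leaf sv
            | none => d1)
          = (match PySem.List.pyGet? parts (-1) with
             | some leaf => if leaf ≠ "" ∧ d1.contains leaf = false then d1.insert leaf sv else d1
             | none => d1)
      cases PySem.List.pyGet? parts (-1) with
      | none => rfl
      | some leaf =>
        by_cases hleaf : leaf = ""
        · subst hleaf
          show (match (if ("" : String) = "" then none else some ("" : String)) with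
                | some leaf => if d1.contains leaf then d1 else d1.insert leaf sv
                | none => d1)
              = (if ("" : String) ≠ "" ∧ d1.contains "" = false then d1.insert "" sv else d1)
          rw [if_pos rfl, if_neg (by simp)]
        · show (match (if leaf = "" then none else some leaf) with
                | some l => if d1.contains l then d1 else d1.insert l sv
                | none => d1)
              = (if leaf ≠ "" ∧ d1.contains leaf = false then d1.insert leaf sv else d1)
          rw [if_neg hleaf]
          show (if d1.contains leaf = true then d1 else d1.insert leaf sv)
              = (if leaf ≠ "" ∧ d1.contains leaf = false then d1.insert leaf sv else d1)
          by_cases hc : d1.contains leaf = true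
          · rw [if_pos hc, if_neg (by simp [hc])]
          · have hc' : d1.contains leaf = false := by
              revert hc; cases d1.contains leaf <;> simp
            rw [if_neg hc, if_pos ⟨hleaf, hc'⟩]
  · rw [if_neg hi, if_neg hi]

theorem normPass_step (d : PySem.Dict String String) (kv : String × String)
    (rest : List (String × String)) :
    normPass d (kv :: rest) = normPass (buildStep d kv) rest := by
  obtain ⟨k, v⟩ := kv
  by_cases h : PySem.Str.strip v = ""
  · have hb : buildStep d (k, v) = d := by
      unfold buildStep; dsimp only; rw [if_pos h]
    rw [hb]
    simp only [normPass]
    rw [if_pos h]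
  · have hb : buildStep d (k, v)
        = (match leafOf (normKey k) with
           | some leaf => if (d.insert (normKey k) (PySem.Str.strip v)).contains leaf
                          then d.insert (normKey k) (PySem.Str.strip v)
                          else (d.insert (normKey k) (PySem.Str.strip v)).insert leaf (PySem.Str.strip v)
           | none => d.insert (normKey k) (PySem.Str.strip v)) := by
      unfold buildStep; dsimp only; rw [if_neg h, ← leafStep_eq]
    rw [hb]
    simp only [normPass]
    rw [if_neg h]

theorem normPass_foldl (parsed : List (String × String)) :
    ∀ d, normPass d parsed = parsed.foldl buildStep d := by
  induction parsed with
  | nil => intro d; rfl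
  | cons kv rest ih => intro d; rw [normPass_step, List.foldl_cons, ih]

theorem normPass_eq (parsed : List (String × String)) :
    normPass PySem.Dict.empty parsed = buildNorm parsed :=
  normPass_foldl parsed PySem.Dict.empty

-- ---- B's derivation tail = A's derivation tail ----

-- B's trailing derivation block, named so the proof can talk about it (proof-only helper)
def deriveB (out0 : PySem.Dict String String) : PySem.Dict String String :=
  let out1 :=
    if out0.contains "year_of_birth" = false ∧ out0.contains "date_of_birth" = true then
      match yearFromDob (out0.getD "date_of_birth" "") with
      | some y => out0.insert "year_of_birth" y
      | none => out0
    else out0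
  if out1.contains "date_of_birth" = false ∧ out1.contains "year_of_birth" = true then
    let y := PySem.Str.strip (out1.getD "year_of_birth" "")
    if PySem.Str.len y = 4 ∧ PySem.Str.strIsdigit y = true then out1.insert "date_of_birth" y
    else out1
  else out1

theorem firstYear_eq (ps : List String) : firstYear ps = yearFromParts ps := by
  induction ps with
  | nil => rfl
  | cons p t ih =>
    unfold firstYear
    rw [List.find?_cons]
    simp only [yearFromParts]
    by_cases h : PySem.Str.len p = 4 ∧ PySem.Str.strIsdigit p = true
    · have hb : (PySem.Str.len p == 4 && PySem.Str.strIsdigit p) = true := by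
        rw [h.1, h.2]; rfl
      rw [hb, if_pos h]
    · have hb : (PySem.Str.len p == 4 && PySem.Str.strIsdigit p) = false := by
        rcases Decidable.not_and_iff_or_not.mp h with h1 | h1
        · rw [beq_eq_false_iff_ne.mpr h1, Bool.false_and]
        · have h2 : PySem.Str.strIsdigit p = false := by
            revert h1; cases PySem.Str.strIsdigit p <;> simp
          rw [h2, Bool.and_false]
      rw [hb, if_neg h]
      exact ih

theorem deriveFirst_eq (out0 : PySem.Dict String String) :
    (if out0.contains "year_of_birth" = false ∧ out0.contains "date_of_birth" = true then
      match yearFromDob (out0.getD "date_of_birth" "") with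
      | some y => out0.insert "year_of_birth" y
      | none => out0
    else out0)
    = (if out0.contains "year_of_birth" = false ∧ out0.contains "date_of_birth" = true then
      if 4 ≤ PySem.Str.len (out0.getD "date_of_birth" "") ∧
          PySem.Str.strIsdigit (PySem.Str.slice (out0.getD "date_of_birth" "") none (some 4)) = true then
        out0.insert "year_of_birth" (PySem.Str.slice (out0.getD "date_of_birth" "") none (some 4))
      else if PySem.Str.isIn "-" (out0.getD "date_of_birth" "") then
        match PySem.Str.split? (out0.getD "date_of_birth" "") "-" with
        | some parts =>
          match yearFromParts parts with
          | some p => out0.insert "year_of_birth" p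
          | none => out0
        | none => out0
      else if PySem.Str.isIn "/" (out0.getD "date_of_birth" "") then
        match PySem.Str.split? (PySem.Str.replace (out0.getD "date_of_birth" "") "." "/") "/" with
        | some parts =>
          match yearFromParts (parts.map PySem.Str.strip) with
          | some p => out0.insert "year_of_birth" p
          | none => out0
        | none => out0
      else out0
    else out0) := by
  by_cases hg : out0.contains "year_of_birth" = false ∧ out0.contains "date_of_birth" = true
  · rw [if_pos hg, if_pos hg]
    generalize (out0.getD "date_of_birth" "") = dob
    unfold yearFromDob
    by_cases h1 : 4 ≤ PySem.Str.len dob ∧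
        PySem.Str.strIsdigit (PySem.Str.slice dob none (some 4)) = true
    · rw [if_pos h1, if_pos h1]
    · rw [if_neg h1, if_neg h1]
      by_cases h2 : PySem.Str.isIn "-" dob = true
      · rw [if_pos h2, if_pos h2]
        cases hsp : PySem.Str.split? dob "-" with
        | none => rfl
        | some parts =>
          simp only [Option.getD_some, firstYear_eq]
      · rw [if_neg h2, if_neg h2]
        by_cases h3 : PySem.Str.isIn "/" dob = true
        · rw [if_pos h3, if_pos h3]
          cases hsp : PySem.Str.split? (PySem.Str.replace dob "." "/") "/" with
          | none => rfl
          | some parts =>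
            simp only [Option.getD_some, firstYear_eq]
        · rw [if_neg h3, if_neg h3]
  · rw [if_neg hg, if_neg hg]

theorem deriveSecond_eq (w : PySem.Dict String String) :
    (if w.contains "date_of_birth" = false ∧ w.contains "year_of_birth" = true then
       if PySem.Str.len (PySem.Str.strip (w.getD "year_of_birth" "")) = 4 ∧
           PySem.Str.strIsdigit (PySem.Str.strip (w.getD "year_of_birth" "")) = true then
         w.insert "date_of_birth" (PySem.Str.strip (w.getD "year_of_birth" ""))
       else w
     else w)
    = (if w.contains "date_of_birth" = false ∧ w.contains "year_of_birth" = true then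
       if PySem.Str.strIsdigit (PySem.Str.strip (w.getD "year_of_birth" "")) = true ∧
           PySem.Str.len (PySem.Str.strip (w.getD "year_of_birth" "")) = 4 then
         w.insert "date_of_birth" (PySem.Str.strip (w.getD "year_of_birth" ""))
       else w
     else w) := by
  split
  · split
    · split
      · rfl
      · rename_i h1 h2
        exact absurd ⟨h1.2, h1.1⟩ h2
    · split
      · rename_i h1 h2
        exact absurd ⟨h2.2, h2.1⟩ h1
      · rfl
  · rfl

set_option maxHeartbeats 1000000 in
theorem deriveB_eq (out0 : PySem.Dict String String) : deriveB out0 = derivePhase out0 := by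
  unfold deriveB derivePhase
  dsimp only
  rw [deriveFirst_eq out0, deriveSecond_eq]

-- ---- B's matching pass = A's matching pass (priority/rank argument) ----

theorem buildStep_nodup (d : PySem.Dict String String) (kv : String × String)
    (h : d.keys.Nodup) : (buildStep d kv).keys.Nodup := by
  unfold buildStep
  dsimp only
  split
  · exact h
  · have h1 := PySem.Dict.nodup_keys_insert d (normKey kv.1) (PySem.Str.strip kv.2) h
    split
    · split
      · split
        · split
          · exact PySem.Dict.nodup_keys_insert _ _ _ h1
          · exact h1
        · exact h1
      · exact h1
    · exact h1

theorem foldl_buildStep_nodup (l : List (String × String)) (d : PySem.Dict String String)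
    (h : d.keys.Nodup) : (l.foldl buildStep d).keys.Nodup := by
  induction l generalizing d with
  | nil => exact h
  | cons kv t ih => exact ih _ (buildStep_nodup d kv h)

theorem buildNorm_nodup_keys (parsed : List (String × String)) :
    (buildNorm parsed).keys.Nodup :=
  foldl_buildStep_nodup parsed PySem.Dict.empty PySem.Dict.nodup_keys_empty

theorem lookupL_eq_get? (d : PySem.Dict String String) (n : String) :
    lookupL d.items n = d.get? n := rfl

theorem firstHit_eq_bspecL (d : PySem.Dict String String) (cs : List String) (k : Nat) :
    firstHit d cs = (bspecL d.items k (cs.map normKey)).map (·.2) := by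
  induction cs generalizing k with
  | nil => rfl
  | cons c t ih =>
    show (if d.contains (normKey c) then d.get? (normKey c) else firstHit d t) = _
    rw [PySem.Dict.contains_eq_isSome_get?]
    simp only [List.map_cons, bspecL, lookupL_eq_get?]
    cases h : d.get? (normKey c) with
    | some v => simp
    | none => simp [ih (k+1)]

theorem fieldMap_keys_nodup : (fieldMap.map (·.1)).Nodup := by decide

theorem cand_nodup : ∀ fc ∈ fieldMap, (fc.2.map normKey).Nodup := by decide

theorem bspecL_rank (items : List (String × String)) (ncs : List String) :
    ∀ (k : Nat) (c : Nat × String), bspecL items k ncs = some c → k ≤ c.1 := by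
  induction ncs with
  | nil => intro k c h; simp [bspecL] at h
  | cons a t ih =>
    intro k c h
    simp only [bspecL] at h
    cases hl : lookupL items a with
    | some v => rw [hl] at h; cases h; simp
    | none => rw [hl] at h; exact Nat.le_of_succ_le (ih (k+1) c h)

theorem mem_withIdx (f : String) (k : Nat) (cs : List String) :
    ∀ p ∈ withIdx f k cs, p.2.1 = f := by
  induction cs generalizing k with
  | nil => intro p hp; simp [withIdx] at hp
  | cons c t ih =>
    intro p hp
    simp only [withIdx, List.mem_cons] at hp
    rcases hp with rfl | hp
    · rfl
    · exact ih (k+1) p hp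

theorem mem_withIdx_key (f : String) (k : Nat) (cs : List String) :
    ∀ p ∈ withIdx f k cs, p.1 ∈ cs.map normKey := by
  induction cs generalizing k with
  | nil => intro p hp; simp [withIdx] at hp
  | cons c t ih =>
    intro p hp
    simp only [withIdx, List.mem_cons] at hp
    rcases hp with rfl | hp
    · simp
    · simp only [List.map_cons, List.mem_cons]
      exact Or.inr (ih (k+1) p hp)

theorem mem_flatMap_field (fm : List (String × List String)) :
    ∀ p ∈ fm.flatMap (fun fc => withIdx fc.1 0 fc.2), p.2.1 ∈ fm.map (·.1) := by
  intro p hp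
  simp only [List.mem_flatMap] at hp
  obtain ⟨fc, hfc, hp⟩ := hp
  rw [mem_withIdx fc.1 0 fc.2 p hp]
  exact List.mem_map_of_mem hfc

theorem filter_flatMap_field (fm : List (String × List String))
    (hnd : (fm.map (·.1)).Nodup) (f : String) (cs : List String) (hm : (f, cs) ∈ fm) :
    (fm.flatMap (fun fc => withIdx fc.1 0 fc.2)).filter (fun p => p.2.1 == f)
      = withIdx f 0 cs := by
  induction fm with
  | nil => simp at hm
  | cons gd rest ih =>
    obtain ⟨g, ds⟩ := gd
    simp only [List.map_cons, List.nodup_cons] at hnd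
    simp only [List.flatMap_cons, List.filter_append]
    rcases List.mem_cons.mp hm with heq | hm
    · obtain ⟨rfl, rfl⟩ := Prod.mk.injEq .. ▸ heq
      have h1 : (withIdx f 0 cs).filter (fun p => p.2.1 == f) = withIdx f 0 cs :=
        List.filter_eq_self.mpr (fun p hp => by simp [mem_withIdx _ _ _ p hp])
      have h2 : (rest.flatMap (fun fc => withIdx fc.1 0 fc.2)).filter (fun p => p.2.1 == f) = [] := by
        apply List.filter_eq_nil_iff.mpr
        intro p hp
        have hmem := mem_flatMap_field rest p hp
        simp only [beq_iff_eq]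
        intro hcontr
        exact hnd.1 (hcontr ▸ hmem)
      rw [h1, h2, List.append_nil]
    · have hf : f ∈ rest.map (·.1) := by
        have : (f, cs).1 ∈ rest.map (·.1) := List.mem_map_of_mem hm
        simpa using this
      have hne : g ≠ f := fun h => hnd.1 (h ▸ hf)
      have h1 : (withIdx g 0 ds).filter (fun p => p.2.1 == f) = [] := by
        apply List.filter_eq_nil_iff.mpr
        intro p hp
        simp [mem_withIdx _ _ _ p hp, hne]
      rw [h1, List.nil_append, ih hnd.2 hm]

theorem foldl_withIdx_filter (f v : String) (cs : List String) (k : Nat) (n : String)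
    (o : Option (Nat × String)) (hnd : (cs.map normKey).Nodup) :
    ((withIdx f k cs).filter (fun p => p.1 == n)).foldl (fun o p => updMin o p.2.2 v) o
      = match List.findIdx? (fun c => c == n) (cs.map normKey) with
        | some r => updMin o (k+r) v
        | none => o := by
  induction cs generalizing k with
  | nil => simp [withIdx, List.findIdx?_nil]
  | cons c t ih =>
    simp only [List.map_cons, List.nodup_cons] at hnd
    simp only [withIdx, List.findIdx?_cons, List.map_cons]
    by_cases hcn : normKey c = n
    · subst hcn
      have hfilter : (withIdx f (k+1) t).filter (fun p => p.1 == normKey c) = [] := by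
        apply List.filter_eq_nil_iff.mpr
        intro p hp
        have hmem := mem_withIdx_key f (k+1) t p hp
        simp only [beq_iff_eq]
        intro hcontr
        exact hnd.1 (hcontr ▸ hmem)
      simp [hfilter]
    · have hb : (normKey c == n) = false := by simp [hcn]
      simp only [List.filter_cons, hb, Bool.false_eq_true, if_false, ih (k+1) hnd.2]
      cases List.findIdx? (fun x => x == n) (t.map normKey) with
      | none => rfl
      | some r =>
        simp only [Option.map_some]
        have harith : k + 1 + r = k + (r + 1) := by omega
        rw [harith]

theorem lookupL_none (items : List (String × String)) (c : String)
    (h : ∀ p ∈ items, p.1 ≠ c) : lookupL items c = none := by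
  simp only [lookupL, Option.map_eq_none_iff, List.find?_eq_none]
  intro p hp
  simp [h p hp]

theorem lookupL_mid (pre post : List (String × String)) (c vc : String)
    (h : ∀ p ∈ pre, p.1 ≠ c) : lookupL (pre ++ (c, vc) :: post) c = some vc := by
  simp only [lookupL, List.find?_append]
  have h1 : List.find? (fun p => p.1 == c) pre = none := by
    rw [List.find?_eq_none]; intro p hp; simp [h p hp]
  rw [h1]
  simp

theorem cmin_none (b : Option (Nat × String)) : cmin none b = b := by
  cases b with
  | none => rfl
  | some c => cases c; rfl

theorem alg_step (o B1 B2 : Option (Nat × String)) (k : Nat) (vc : String)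
    (ho : ∀ c, o = some c → c.1 < k)
    (h1 : ∀ c, B1 = some c → k + 1 ≤ c.1)
    (h2 : ∀ c, B2 = some c → k + 1 ≤ c.1) :
    cmin (updMin (cmin o B1) k vc) B2 = updMin o k vc := by
  cases o with
  | none =>
    cases B1 with
    | none =>
      cases B2 with
      | none => rfl
      | some c2 =>
        have := h2 c2 rfl
        simp only [cmin, updMin]
        rw [if_neg (by omega)]
    | some c1 =>
      have := h1 c1 rfl
      simp only [cmin, updMin]
      rw [if_pos (by omega)]
      cases B2 with
      | none => rfl
      | some c2 =>
        have := h2 c2 rfl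
        dsimp only [cmin, updMin]
        rw [if_neg (by omega)]
  | some co =>
    have hco := ho co rfl
    have hkeep : updMin (some co) k vc = some co := by
      simp only [updMin]; rw [if_neg (by omega)]
    cases B1 with
    | none =>
      simp only [cmin, hkeep]
      cases B2 with
      | none => rfl
      | some c2 =>
        have := h2 c2 rfl
        simp only [updMin]
        rw [if_neg (by omega)]
    | some c1 =>
      have hc1 := h1 c1 rfl
      have : updMin (some co) c1.1 c1.2 = some co := by
        simp only [updMin]; rw [if_neg (by omega)]
      simp only [cmin, this, hkeep]
      cases B2 with
      | none => rfl
      | some c2 =>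
        have := h2 c2 rfl
        simp only [updMin]
        rw [if_neg (by omega)]

theorem shiftStep (c : String) (t : List String) (k : Nat)
    (l : List (String × String)) (hl : ∀ p ∈ l, p.1 ≠ c) (o : Option (Nat × String)) :
    l.foldl (fun o nv => match List.findIdx? (fun x => x == nv.1) (c :: t) with
        | some r => updMin o (k+r) nv.2
        | none => o) o
    = l.foldl (fun o nv => match List.findIdx? (fun x => x == nv.1) t with
        | some r => updMin o ((k+1)+r) nv.2
        | none => o) o := by
  apply PySem.List.foldl_congr_mem
  intro acc nv hnv
  have hne : (c == nv.1) = false := by simp [Ne.symm (hl nv hnv)]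
  rw [List.findIdx?_cons, hne]
  simp only [Bool.false_eq_true, if_false]
  cases List.findIdx? (fun x => x == nv.1) t with
  | none => rfl
  | some r =>
    simp only [Option.map_some]
    have : k + (r + 1) = (k + 1) + r := by omega
    rw [this]

theorem Mlem (ncs : List String) :
    ∀ (items : List (String × String)) (k : Nat) (o : Option (Nat × String)),
    (items.map Prod.fst).Nodup → (∀ c, o = some c → c.1 < k) →
    items.foldl (fun o nv => match List.findIdx? (fun c => c == nv.1) ncs with
        | some r => updMin o (k+r) nv.2
        | none => o) o
      = cmin o (bspecL items k ncs) := by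
  induction ncs with
  | nil =>
    intro items k o _ _
    have hconst : ∀ (ts : List (String × String)) (o : Option (Nat × String)),
        List.foldl (fun o (_ : String × String) => o) o ts = o := by
      intro ts
      induction ts with
      | nil => intro o; rfl
      | cons a t iht => intro o; rw [List.foldl_cons]; exact iht o
    have h : items.foldl (fun o (nv : String × String) =>
        match List.findIdx? (fun c => c == nv.1) ([] : List String) with
        | some r => updMin o (k+r) nv.2
        | none => o) o = o := by
      simp only [List.findIdx?_nil]
      exact hconst items o
    rw [h]
    rfl
  | cons c t ih =>
    intro items k o hnd ho
    by_cases hc : c ∈ items.map Prod.fst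
    · obtain ⟨p, hp, hpc⟩ := List.mem_map.mp hc
      obtain ⟨pre, post, rfl⟩ := List.append_of_mem hp
      obtain ⟨c', vc⟩ := p
      cases hpc
      have hnd' := hnd
      simp only [List.map_append, List.map_cons, List.nodup_append, List.nodup_cons] at hnd'
      obtain ⟨hndpre, ⟨hcpost, hndpost⟩, hdisj⟩ := hnd'
      have hcpre : ∀ p ∈ pre, p.1 ≠ c' := by
        intro p hp h
        exact hdisj p.1 (List.mem_map_of_mem hp) c' (List.mem_cons_self) h
      have hcpost' : ∀ p ∈ post, p.1 ≠ c' := by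
        intro p hp h
        exact hcpost (h ▸ List.mem_map_of_mem hp)
      rw [List.foldl_append, List.foldl_cons, shiftStep c' t k pre hcpre o,
          shiftStep c' t k post hcpost']
      have hhead : (List.findIdx? (fun x => x == c') (c' :: t)) = some 0 := by
        rw [List.findIdx?_cons]; simp
      rw [hhead]
      set o1 := pre.foldl (fun o nv => match List.findIdx? (fun x => x == nv.1) t with
          | some r => updMin o ((k+1)+r) nv.2
          | none => o) o with ho1def
      have hpre := ih pre (k+1) o hndpre (fun c hc => Nat.lt_succ_of_lt (ho c hc))
      have hrank : ∀ cx, updMin o1 (k+0) vc = some cx → cx.1 < k+1 := by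
        intro cx h
        cases ho1 : o1 with
        | none => rw [ho1] at h; cases h; omega
        | some cy =>
          rw [ho1] at h
          simp only [updMin] at h
          split at h
          · cases h; omega
          · cases h; omega
      rw [ih post (k+1) (updMin o1 (k+0) vc) hndpost hrank]
      have hB1 := bspecL_rank pre t
      have hB2 := bspecL_rank post t
      have hmid : bspecL (pre ++ (c', vc) :: post) k (c' :: t) = some (k, vc) := by
        simp only [bspecL, lookupL_mid pre post c' vc hcpre]
      rw [hmid, ho1def, hpre]
      simp only [Nat.add_zero]
      exact alg_step o _ _ k vc ho (fun c h => hB1 (k+1) c h) (fun c h => hB2 (k+1) c h)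
    · have hall : ∀ p ∈ items, p.1 ≠ c := by
        intro p hp h
        exact hc (h ▸ List.mem_map_of_mem hp)
      rw [shiftStep c t k items hall o,
          ih items (k+1) o hnd (fun cx hcx => Nat.lt_succ_of_lt (ho cx hcx))]
      have : bspecL items k (c :: t) = bspecL items (k+1) t := by
        simp only [bspecL, lookupL_none items c hall]
      rw [this]

theorem inner_pointwise (f v : String) (l : List (String × Nat)) :
    ∀ (b : PySem.Dict String (Nat × String)),
    (l.foldl (fun b fr => match b.get? fr.1 with
        | none => b.insert fr.1 (fr.2, v)
        | some cur => if fr.2 < cur.1 then b.insert fr.1 (fr.2, v) else b) b).get? f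
    = l.foldl (fun o fr => if fr.1 = f then updMin o fr.2 v else o) (b.get? f) := by
  induction l with
  | nil => intro b; rfl
  | cons fr t ih =>
    intro b
    rw [List.foldl_cons, List.foldl_cons, ih]
    congr 1
    by_cases hf : fr.1 = f
    · subst hf
      cases h : b.get? fr.1 with
      | none => simp [updMin, PySem.Dict.get?_insert_self]
      | some cur =>
        simp only [updMin]
        split
        · exact PySem.Dict.get?_insert_self b fr.1 (fr.2, v)
        · exact h
    · cases h : b.get? fr.1 with
      | none => simp [hf, PySem.Dict.get?_insert_of_ne _ _ (fun hh => hf hh.symm)]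
      | some cur =>
        simp only [hf, if_false]
        split
        · exact PySem.Dict.get?_insert_of_ne _ _ (fun hh => hf hh.symm)
        · rfl

theorem outer_pointwise (f : String) (d : PySem.Dict String String) :
    ∀ (b : PySem.Dict String (Nat × String)),
    ((d.items.foldl (fun b nv =>
        (revIndex.getD nv.1 []).foldl (fun b fr =>
          match b.get? fr.1 with
          | none => b.insert fr.1 (fr.2, nv.2)
          | some cur => if fr.2 < cur.1 then b.insert fr.1 (fr.2, nv.2) else b) b) b).get? f)
    = d.items.foldl (fun o nv =>
        (revIndex.getD nv.1 []).foldl (fun o fr => if fr.1 = f then updMin o fr.2 nv.2 else o) o)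
        (b.get? f) := by
  induction d.items with
  | nil => intro b; rfl
  | cons nv t ih =>
    intro b
    rw [List.foldl_cons, List.foldl_cons, ih, inner_pointwise]

theorem revIndex_getD (n : String) :
    revIndex.getD n [] = (revPairs.filter (fun p => p.1 == n)).map (·.2) := by
  unfold revIndex
  rw [PySem.Dict.getD_foldl_modify_append revPairs PySem.Dict.empty n,
      PySem.Dict.getD_empty]
  rfl

theorem stepB_eq (f : String) (cs : List String) (hm : (f, cs) ∈ fieldMap)
    (n v : String) (o : Option (Nat × String)) :
    (revIndex.getD n []).foldl (fun o fr => if fr.1 = f then updMin o fr.2 v else o) o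
    = match List.findIdx? (fun c => c == n) (cs.map normKey) with
      | some r => updMin o (0+r) v
      | none => o := by
  rw [revIndex_getD n, List.foldl_map]
  have hcongr : ((revPairs.filter (fun p => p.1 == n)).foldl
      (fun o p => if p.2.1 = f then updMin o p.2.2 v else o) o)
      = ((revPairs.filter (fun p => p.1 == n)).foldl
      (fun o p => if ((fun q : String × String × Nat => q.2.1 == f) p) = true
                  then updMin o p.2.2 v else o) o) := by
    apply PySem.List.foldl_congr_mem
    intro acc p _
    by_cases h : p.2.1 = f <;> simp [h]
  rw [hcongr, ← List.foldl_filter, List.filter_filter]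
  have hblock : revPairs.filter (fun p => p.2.1 == f) = withIdx f 0 cs := by
    unfold revPairs
    exact filter_flatMap_field fieldMap fieldMap_keys_nodup f cs hm
  have hsw : revPairs.filter (fun a => (a.2.1 == f) && (a.1 == n))
      = (withIdx f 0 cs).filter (fun p => p.1 == n) := by
    have hb : revPairs.filter (fun a => (a.2.1 == f) && (a.1 == n))
        = revPairs.filter (fun a => (a.1 == n) && (a.2.1 == f)) :=
      List.filter_congr (fun p _ => Bool.and_comm _ _)
    rw [hb, ← List.filter_filter, hblock]
  rw [hsw]
  exact foldl_withIdx_filter f v cs 0 n o (cand_nodup (f, cs) hm)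

theorem bestOf_get? (d : PySem.Dict String String) (f : String) (cs : List String)
    (hnd : d.keys.Nodup) (hmem : (f, cs) ∈ fieldMap) :
    (bestOf d).get? f = bspecL d.items 0 (cs.map normKey) := by
  unfold bestOf
  rw [outer_pointwise f d PySem.Dict.empty, PySem.Dict.get?_empty]
  have hcongr : (d.items.foldl (fun o nv =>
        (revIndex.getD nv.1 []).foldl (fun o fr => if fr.1 = f then updMin o fr.2 nv.2 else o) o)
        none)
      = (d.items.foldl (fun o nv =>
          match List.findIdx? (fun c => c == nv.1) (cs.map normKey) with
          | some r => updMin o (0+r) nv.2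
          | none => o) none) := by
    apply PySem.List.foldl_congr_mem
    intro acc nv _
    exact stepB_eq f cs hmem nv.1 nv.2 acc
  rw [hcongr]
  have hnd' : (d.items.map Prod.fst).Nodup := hnd
  rw [Mlem (cs.map normKey) d.items 0 none hnd' (fun c h => by cases h)]
  exact cmin_none _

theorem matchFields_eq (d : PySem.Dict String String) (hnd : d.keys.Nodup) :
    matchFields d = matchFieldsB d := by
  unfold matchFields matchFieldsB
  apply PySem.List.foldl_congr_mem
  intro out fc hfc
  obtain ⟨f, cs⟩ := fc
  rw [firstHit_eq_bspecL d cs 0, bestOf_get? d f cs hnd hfc]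
  cases bspecL d.items 0 (cs.map normKey) with
  | none => rfl
  | some rv => rfl

theorem matchFieldsB_fold (d : PySem.Dict String String) :
    ((fieldMap.map (·.1)).foldl (fun out f =>
      match (bestOf d).get? f with
      | some rv => out.insert f rv.2
      | none => out) PySem.Dict.empty) = matchFieldsB d := by
  unfold matchFieldsB
  rw [List.foldl_map]

-- ===== VERDICT (by name: the statement is the Claim_ definition above) =====
set_option maxHeartbeats 1000000 in
theorem extract_uidai_fields_py_spec : Claim_equal_extract_uidai_fields_py := by
  intro parsed _
  unfold Spec_extract_uidai_fields_py
  have hB : extract_uidai_fields_py_alt parsed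
      = (deriveB ((fieldMap.map (·.1)).foldl (fun out f =>
          match (bestOf (normPass PySem.Dict.empty parsed)).get? f with
          | some rv => out.insert f rv.2
          | none => out) PySem.Dict.empty)).items := rfl
  rw [hB, normPass_eq, matchFieldsB_fold, deriveB_eq,
      ← matchFields_eq _ (buildNorm_nodup_keys parsed)]
  rfl
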